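-- pv_equiv track=rewrite | github.com/leusonguenha/deap | 2-sistemasImunologicos/2-ataqueBrutoAdaptativo.py | brute_force_attack
-- ===== SOURCE A (Python) =====
-- import itertools
-- import string
--
-- def brute_force_attack(target_hash, password_length, common_passwords):
--     # Tenta senhas comuns primeiro
--     for password in common_passwords:
--         if hash_password(password) == target_hash:
--             return password
--
--     # Gera senhas de comprimento variável
--     for length in range(1, password_length + 1):
--         for guess in itertools.product(string.ascii_lowercase, repeat=length):
--             guess_password = ''.join(guess)
--             if hash_password(guess_password) == target_hash:
--                 return guess_password
--
--     return None
--
-- def hash_password(password):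
--     return sum(ord(char) for char in password)  # Simplificação do hash
-- ===== SOURCE B (Python) =====
-- def brute_force_attack(target_hash, password_length, common_passwords):
--     # Try common passwords first (same as the task demands)
--     for password in common_passwords:
--         if sum(map(ord, password)) == target_hash:
--             return password
--     # Smallest length L with a lowercase string of char-sum target_hash:
--     # feasible lengths are ceil(target/122) <= L <= target//97; pick the smallest >= 1.
--     L = max(1, -(-target_hash // 122))
--     if L <= password_length and 97 * L <= target_hash:
--         # Greedy lexicographically-smallest string of length L with that sum.
--         chars = []
--         rem = target_hash
--         for i in range(L):
--             rest = L - i - 1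
--             c = max(97, rem - 122 * rest)
--             chars.append(chr(c))
--             rem -= c
--         return ''.join(chars)
--     return None
-- ===== Notes on version B (the rewrite author's own statement) =====
-- stated objective: faster
-- what changed: Instead of enumerating all 26^length lowercase strings per length, B computes the smallest feasible length in closed form (ceil(target/122)) and builds the lexicographically smallest string with the required character sum greedily, character by character; intended as asymptotically faster (unconfirmed in a timing run: A timed out on the larger generated sizes where B returned, and the sizes both finished were too small to measure a ratio).
import Mathlib
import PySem

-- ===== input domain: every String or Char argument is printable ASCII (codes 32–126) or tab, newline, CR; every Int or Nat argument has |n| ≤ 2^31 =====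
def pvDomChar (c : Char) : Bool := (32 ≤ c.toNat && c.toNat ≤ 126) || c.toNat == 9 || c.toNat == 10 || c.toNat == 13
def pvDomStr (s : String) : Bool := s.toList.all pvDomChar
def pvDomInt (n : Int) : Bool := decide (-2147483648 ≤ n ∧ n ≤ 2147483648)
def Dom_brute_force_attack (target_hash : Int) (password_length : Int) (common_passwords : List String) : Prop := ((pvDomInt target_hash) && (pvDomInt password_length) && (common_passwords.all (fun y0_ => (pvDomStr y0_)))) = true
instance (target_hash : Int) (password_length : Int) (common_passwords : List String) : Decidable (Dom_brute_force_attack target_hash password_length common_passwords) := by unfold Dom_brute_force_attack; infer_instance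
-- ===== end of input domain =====

-- B replaces A's exhaustive enumeration of all 26^length lowercase strings by a closed-form
-- smallest feasible length plus a greedy per-character construction of the lexicographically
-- smallest string with the required character sum; intended as faster (unconfirmed by the timing
-- run: A timed out where B returned on the larger sizes, and the sizes both finished were too
-- small to measure a ratio).

-- ===== PORT A =====
-- hash_password(password) = sum(ord(char) for char in password)
def pvHash (s : String) : Int := s.toList.foldl (fun acc c => acc + (c.toNat : Int)) 0

-- for password in common_passwords: if hash == target: return password
def pvScanCommonA (target : Int) : List String → Option String
  | [] => none
  | p :: rest => if pvHash p = target then some p else pvScanCommonA target rest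

def pvLower : List Char := "abcdefghijklmnopqrstuvwxyz".toList

-- itertools.product(string.ascii_lowercase, repeat=n), in iteration order
def pvProduct : Nat → List (List Char)
  | 0 => [[]]
  | n + 1 => pvLower.flatMap (fun c => (pvProduct n).map (fun g => c :: g))

-- for guess in product(...): guess_password = ''.join(guess); if hash == target: return it
def pvScanGuesses (target : Int) : List (List Char) → Option String
  | [] => none
  | g :: rest =>
      if pvHash (String.ofList g) = target then some (String.ofList g) else pvScanGuesses target rest

-- for length in range(1, password_length + 1): ...
def pvLenLoop (target : Int) : List Int → Option String
  | [] => none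
  | l :: rest =>
      match pvScanGuesses target (pvProduct l.toNat) with
      | some s => some s
      | none => pvLenLoop target rest

def brute_force_attack (target_hash : Int) (password_length : Int) (common_passwords : List String) : Option String :=
  match pvScanCommonA target_hash common_passwords with
  | some p => some p
  | none => pvLenLoop target_hash (PySem.List.pyRange 1 (password_length + 1) 1)

-- ===== PORT B =====
-- sum(map(ord, password))
def pvHashB (s : String) : Int := (s.toList.map (fun c => (c.toNat : Int))).sum

def pvScanCommonB (target : Int) : List String → Option String
  | [] => none
  | p :: rest => if pvHashB p = target then some p else pvScanCommonB target rest

-- greedy loop: for i in range(L): c = max(97, rem - 122*rest); append chr(c); rem -= c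
def pvGreedy : Nat → Int → List Char
  | 0, _ => []
  | n + 1, rem =>
      let c := max 97 (rem - 122 * (n : Int))
      Char.ofNat c.toNat :: pvGreedy n (rem - c)

def brute_force_attack_alt (target_hash : Int) (password_length : Int) (common_passwords : List String) : Option String :=
  match pvScanCommonB target_hash common_passwords with
  | some p => some p
  | none =>
      let L : Int := max 1 (-(PySem.Int.floordiv (-target_hash) 122))
      if L ≤ password_length ∧ 97 * L ≤ target_hash then
        some (String.ofList (pvGreedy L.toNat target_hash))
      else none

-- ===== PRECONDITION & SPEC =====
def Spec_brute_force_attack (target_hash : Int) (password_length : Int) (common_passwords : List String) (out : Option String) : Prop := out = brute_force_attack_alt target_hash password_length common_passwords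
instance (target_hash : Int) (password_length : Int) (common_passwords : List String) (out : Option String) : Decidable (Spec_brute_force_attack target_hash password_length common_passwords out) := by unfold Spec_brute_force_attack; infer_instance

-- ===== CLAIM (what is proved, stated in full; the proofs are below) =====
def Claim_equal_brute_force_attack : Prop := ∀ (target_hash : Int) (password_length : Int) (common_passwords : List String), Dom_brute_force_attack target_hash password_length common_passwords → Spec_brute_force_attack target_hash password_length common_passwords (brute_force_attack target_hash password_length common_passwords)

-- ===== LEMMAS AND PROOFS =====

theorem pvHashB_eq (s : String) : pvHashB s = pvHash s := by
  simp [pvHashB, pvHash, List.sum_eq_foldl, List.foldl_map]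

theorem pvScanCommon_eq (t : Int) (l : List String) :
    pvScanCommonB t l = pvScanCommonA t l := by
  induction l with
  | nil => rfl
  | cons p rest ih => simp [pvScanCommonA, pvScanCommonB, pvHashB_eq, ih]

def pvHashL (l : List Char) : Int := (l.map (fun c => (c.toNat : Int))).sum

theorem pvHash_mk (l : List Char) : pvHash (String.ofList l) = pvHashL l := by
  rw [← pvHashB_eq]; simp [pvHashB, pvHashL]

theorem pvScan_append (t : Int) (xs ys : List (List Char)) :
    pvScanGuesses t (xs ++ ys) = (pvScanGuesses t xs).or (pvScanGuesses t ys) := by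
  induction xs with
  | nil => simp [pvScanGuesses]
  | cons g rest ih =>
      simp only [List.cons_append, pvScanGuesses]
      split_ifs <;> simp [ih]

theorem pvScan_map_cons (t : Int) (c : Char) (xs : List (List Char)) :
    pvScanGuesses t (xs.map (fun g => c :: g)) =
      (pvScanGuesses (t - c.toNat) xs).map (fun s => String.ofList (c :: s.toList)) := by
  induction xs with
  | nil => simp [pvScanGuesses]
  | cons g rest ih =>
      simp only [List.map_cons, pvScanGuesses, pvHash_mk, pvHashL, List.sum_cons]
      by_cases h : (c.toNat : Int) + (g.map (fun c => (c.toNat : Int))).sum = t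
      · rw [if_pos h, if_pos (by omega)]; simp
      · rw [if_neg h, if_neg (by omega), ih]

-- the 26 lowercase letters, as a consecutive range of codepoints
def pvAlpha (a n : Nat) : List Char := (List.range n).map (fun i => Char.ofNat (a + i))

theorem pvLower_eq : pvLower = pvAlpha 97 26 := by decide

theorem pvAlpha_cons (a n : Nat) : pvAlpha a (n + 1) = Char.ofNat a :: pvAlpha (a + 1) n := by
  simp only [pvAlpha, List.range_succ_eq_map, List.map_cons, List.map_map, Nat.add_zero]
  refine congrArg _ (List.map_congr_left ?_)
  intro i _; simp [Function.comp]; congr 1; omega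

theorem pvChar_toNat (a : Nat) (h : a ≤ 123) : (Char.ofNat a).toNat = a := by
  have hv : a.isValidChar := Or.inl (by omega)
  simp [Char.toNat_ofNat, hv]

-- first match inside the blocks for characters a, a+1, …, a+n-1 (each block = pvProduct L prefixed)
theorem pvScan_blocks (L : Nat)
    (ih : ∀ t : Int, pvScanGuesses t (pvProduct L) =
      if 97 * (L : Int) ≤ t ∧ t ≤ 122 * (L : Int) then some (String.ofList (pvGreedy L t)) else none) :
    ∀ (n a : Nat) (t : Int), 97 ≤ a → a + n ≤ 123 →
      pvScanGuesses t ((pvAlpha a n).flatMap (fun c => (pvProduct L).map (fun g => c :: g))) =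
        (if max (a : Int) (t - 122 * L) < (a : Int) + n ∧ 97 * L ≤ t - max (a : Int) (t - 122 * L) then
          some (String.ofList (Char.ofNat (max (a : Int) (t - 122 * L)).toNat :: pvGreedy L (t - max (a : Int) (t - 122 * L))))
        else none) := by
  intro n
  induction n with
  | zero =>
      intro a t _ _
      rw [if_neg (by have := le_max_left (a : Int) (t - 122 * L); push_cast; omega)]
      simp [pvAlpha, pvScanGuesses]
  | succ n ihn =>
      intro a t ha hb
      have e1 : (((a + 1 : Nat)) : Int) = (a : Int) + 1 := by push_cast; ring
      rw [pvAlpha_cons, List.flatMap_cons, pvScan_append, pvScan_map_cons,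
        pvChar_toNat a (by omega), ih, ihn (a + 1) t (by omega) (by omega), e1]
      push_cast
      rcases le_or_gt (t - 122 * (L : Int)) a with hm | hm
      · rw [max_eq_left (by omega), max_eq_left (by omega)]
        by_cases hfeas : 97 * (L : Int) ≤ t - (a : Int) ∧ t - (a : Int) ≤ 122 * (L : Int)
        · rw [if_pos hfeas]
          simp only [Option.map_some, Option.some_or]
          rw [if_pos (by constructor <;> omega)]
          simp
        · have hlo : t - (a : Int) < 97 * L := by omega
          rw [if_neg hfeas]
          simp only [Option.map_none, Option.none_or]
          rw [if_neg (by omega), if_neg (by omega)]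
      · rw [max_eq_right (by omega), max_eq_right (by omega)]
        rw [if_neg (by omega)]
        simp only [Option.map_none, Option.none_or]
        rw [show ((a : Int) + 1 + (n : Int)) = (a : Int) + ((n : Int) + 1) by ring]

theorem pvScan_product (L : Nat) (t : Int) :
    pvScanGuesses t (pvProduct L) =
      if 97 * (L : Int) ≤ t ∧ t ≤ 122 * (L : Int) then some (String.ofList (pvGreedy L t)) else none := by
  induction L generalizing t with
  | zero =>
      simp only [pvProduct, pvScanGuesses, pvGreedy, pvHash_mk, pvHashL]
      norm_num
      by_cases h : (0 : Int) = t
      · rw [if_pos h, if_pos (by omega)]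
      · rw [if_neg h, if_neg (by omega)]
  | succ L ihL =>
      have h := pvScan_blocks L ihL 26 97 t (by omega) (by omega)
      push_cast at h
      rw [pvProduct, pvLower_eq, h]
      have hg : pvGreedy (L + 1) t =
          Char.ofNat (max 97 (t - 122 * (L : Int))).toNat :: pvGreedy L (t - max 97 (t - 122 * (L : Int))) := rfl
      rw [hg]
      push_cast
      rcases le_or_gt (t - 122 * (L : Int)) 97 with hm | hm
      · rw [max_eq_left (by omega)]
        by_cases hc : (97 : Int) < 123 ∧ 97 * (L : Int) ≤ t - 97
        · rw [if_pos hc, if_pos (by omega)]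
        · rw [if_neg hc, if_neg (by omega)]
      · rw [max_eq_right (by omega)]
        by_cases hc : t - 122 * (L : Int) < (123 : Int) ∧ 97 * (L : Int) ≤ t - (t - 122 * L)
        · rw [if_pos hc, if_pos (by omega)]
        · rw [if_neg hc, if_neg (by omega)]

-- ceiling division: q = -((-t) // 122) satisfies 122*(q-1) < t ≤ 122*q
theorem pvCeil_bounds (t : Int) :
    122 * (-(PySem.Int.floordiv (-t) 122) - 1) < t ∧ t ≤ 122 * (-(PySem.Int.floordiv (-t) 122)) := by
  have h := (PySem.Int.neg_floordiv_neg_eq_iff_of_pos (a := t) (b := 122)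
    (q := -(PySem.Int.floordiv (-t) 122)) (by omega)).mp rfl
  omega

theorem pvLenLoop_range (t : Int) : ∀ (k : Nat) (a pl : Int), 1 ≤ a → pl + 1 - a = (k : Int) →
    pvLenLoop t (PySem.List.pyRange a (pl + 1) 1) =
      (if max a (-(PySem.Int.floordiv (-t) 122)) ≤ pl ∧
          97 * max a (-(PySem.Int.floordiv (-t) 122)) ≤ t then
        some (String.ofList (pvGreedy (max a (-(PySem.Int.floordiv (-t) 122))).toNat t))
      else none) := by
  intro k
  induction k with
  | zero =>
      intro a pl ha hk
      rw [PySem.List.pyRange_one_eq_nil (by omega)]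
      rw [if_neg (by have := le_max_left a (-(PySem.Int.floordiv (-t) 122)); omega)]
      rfl
  | succ k ihk =>
      intro a pl ha hk
      obtain ⟨hq1, hq2⟩ := pvCeil_bounds t
      set q := -(PySem.Int.floordiv (-t) 122) with hqdef
      rw [PySem.List.pyRange_one_cons (by omega)]
      have hacast : ((a.toNat : Int)) = a := by omega
      simp only [pvLenLoop, pvScan_product, hacast]
      by_cases hfeas : 97 * a ≤ t ∧ t ≤ 122 * a
      · have hqa : q ≤ a := by nlinarith [hq1, hfeas.2]
        rw [if_pos hfeas, max_eq_left hqa, if_pos (by constructor <;> omega)]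
      · rw [if_neg hfeas]
        rw [ihk (a + 1) pl (by omega) (by omega)]
        by_cases hhi : 122 * a < t
        · have h1 : max a q = q := max_eq_right (by nlinarith [hq2])
          have h2 : max (a + 1) q = q := max_eq_right (by nlinarith [hq2])
          rw [h1, h2]
        · have hlo : t < 97 * a := by omega
          rw [if_neg, if_neg]
          · have h := le_max_left a q
            intro hcon; nlinarith [hcon.2, h]
          · have h := le_max_left (a + 1) q
            intro hcon; nlinarith [hcon.2, h]

-- ===== VERDICT (by name: the statement is the Claim_ definition above) =====
theorem brute_force_attack_spec : Claim_equal_brute_force_attack := by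
  intro t pl cp _
  unfold Spec_brute_force_attack brute_force_attack brute_force_attack_alt
  rw [pvScanCommon_eq]
  cases pvScanCommonA t cp with
  | some p => rfl
  | none =>
      simp only []
      by_cases hpl : 0 ≤ pl
      · rw [pvLenLoop_range t pl.toNat 1 pl (by omega) (by omega)]
      · rw [PySem.List.pyRange_one_eq_nil (by omega)]
        rw [if_neg (by have := le_max_left (1 : Int) (-(PySem.Int.floordiv (-t) 122)); omega)]
        rfl
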